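-- pv_equiv track=rewrite | github.com/k-harada/AtCoder | other_contests/nikkei2019-2-qual/B.py | solve
-- ===== SOURCE A (Python) =====
-- LARGE = 998244353
--
-- def solve(n, d_list):
--     cnt = [0] * (max(d_list) + 1)
--     for i in range(n):
--         cnt[d_list[i]] += 1
--     if cnt[0] != 1 or d_list[0] != 0:
--         return 0
--     res = 1
--     for i in range(max(d_list)):
--         res *= pow(cnt[i], cnt[i + 1], LARGE)
--         res %= LARGE
--     return res
-- ===== SOURCE B (Python) =====
-- LARGE = 998244353
--
-- def solve(n, d_list):
--     # Count how many of the first n nodes sit at each distance.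
--     cnt = {}
--     for i in range(n):
--         cnt[d_list[i]] = cnt.get(d_list[i], 0) + 1
--     if cnt.get(0, 0) != 1 or d_list[0] != 0:
--         return 0
--     # Each non-root node at distance d picks one of the cnt[d-1] nodes
--     # at distance d-1 as its parent, independently.
--     res = 1
--     for i in range(n):
--         d = d_list[i]
--         if d > 0:
--             res = res * cnt.get(d - 1, 0) % LARGE
--     return res
-- ===== Notes on version B (the rewrite author's own statement) =====
-- stated objective: simpler
-- what changed: B counts distances in a dict and computes the product per NODE (each non-root node at distance d multiplies in cnt[d-1], its number of possible parents) instead of A's per-LEVEL pow(cnt[i], cnt[i+1], p) over a max-sized count array, eliminating modular exponentiation and the max()-sized list entirely.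
-- outside the precondition, e.g. on solve(2, [0, -1]): A returns 0, B returns 1
import Mathlib
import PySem

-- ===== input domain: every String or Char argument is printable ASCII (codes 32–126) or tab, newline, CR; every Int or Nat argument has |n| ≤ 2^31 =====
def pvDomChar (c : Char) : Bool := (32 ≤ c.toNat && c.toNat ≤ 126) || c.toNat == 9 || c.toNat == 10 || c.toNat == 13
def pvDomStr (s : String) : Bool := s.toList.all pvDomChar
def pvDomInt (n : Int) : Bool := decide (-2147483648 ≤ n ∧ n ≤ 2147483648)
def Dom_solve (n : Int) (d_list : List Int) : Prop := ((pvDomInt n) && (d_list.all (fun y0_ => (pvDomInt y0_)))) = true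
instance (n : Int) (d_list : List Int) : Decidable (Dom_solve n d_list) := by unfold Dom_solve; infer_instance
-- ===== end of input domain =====

-- B computes the product per node (each non-root node at distance d contributes a factor
-- cnt[d-1], its number of possible parents) over a dict of counts, instead of A's per-level
-- pow(cnt[i], cnt[i+1], p) over a max(d_list)-sized count array: no modular exponentiation
-- and no max()-sized list.


def LARGE : Int := 998244353

-- ===== PORT A =====
-- Literal transliteration of A. Under Pre_solve every index access is in range, so the total
-- forms pyGetD/pySetD are exact there; max? = none (= ValueError on []) is excluded by Pre_solve.
def solve (n : Int) (d_list : List Int) : Int :=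
  let m : Int := (PySem.List.max? d_list (fun x => x)).getD 0   -- max(d_list); [] raises, outside Pre_
  let cnt0 : List Int := List.replicate (m + 1).toNat 0          -- [0] * (max(d_list) + 1)
  let cnt : List Int := (PySem.List.pyRange 0 n 1).foldl
      (fun c i =>
        let d := PySem.List.pyGetD d_list i 0
        PySem.List.pySetD c d (PySem.List.pyGetD c d 0 + 1)) cnt0   -- cnt[d_list[i]] += 1
  if PySem.List.pyGetD cnt 0 0 ≠ 1 ∨ PySem.List.pyGetD d_list 0 0 ≠ 0 then 0
  else
    (PySem.List.pyRange 0 m 1).foldl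
      (fun res i =>
        PySem.Int.mod
          (res * PySem.Int.powMod (PySem.List.pyGetD cnt i 0)
                   (PySem.List.pyGetD cnt (i + 1) 0).toNat LARGE) LARGE) 1

-- ===== PORT B =====
def solve_alt (n : Int) (d_list : List Int) : Int :=
  let cnt : PySem.Dict Int Int := (PySem.List.pyRange 0 n 1).foldl
      (fun c i =>
        let k := PySem.List.pyGetD d_list i 0
        c.insert k (c.getD k 0 + 1)) PySem.Dict.empty            -- cnt[d] = cnt.get(d, 0) + 1
  if cnt.getD 0 0 ≠ 1 ∨ PySem.List.pyGetD d_list 0 0 ≠ 0 then 0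
  else
    (PySem.List.pyRange 0 n 1).foldl
      (fun res i =>
        let d := PySem.List.pyGetD d_list i 0
        if 0 < d then PySem.Int.mod (res * cnt.getD (d - 1) 0) LARGE else res) 1

-- ===== PRECONDITION & SPEC =====
-- Pre_solve restricts to the problem's natural domain: a non-empty distance list with
-- non-negative distances, and n not exceeding len(d_list). On empty d_list A raises ValueError,
-- on n > len(d_list) both programs raise IndexError, and on negative distances A's value (when
-- it returns at all) is an artefact of Python's negative-index wraparound into the count array.
def Pre_solve (n : Int) (d_list : List Int) : Prop :=
  d_list ≠ [] ∧ n ≤ PySem.List.len d_list ∧ ∀ d ∈ d_list, 0 ≤ d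
instance (n : Int) (d_list : List Int) : Decidable (Pre_solve n d_list) := by
  unfold Pre_solve; infer_instance

def pvWitness_solve : Int × List Int := (4, [0, 1, 1, 2])

def Spec_solve (n : Int) (d_list : List Int) (out : Int) : Prop := out = solve_alt n d_list
instance (n : Int) (d_list : List Int) (out : Int) : Decidable (Spec_solve n d_list out) := by
  unfold Spec_solve; infer_instance

-- ===== CLAIM (what is proved, stated in full; the proofs are below) =====
def Claim_equal_solve : Prop := ∀ (n : Int) (d_list : List Int), Dom_solve n d_list → Pre_solve n d_list → Spec_solve n d_list (solve n d_list)


-- ===== LEMMAS AND PROOFS =====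

theorem foldl_range_take {α β : Type} (xs : List α) (k : Nat) (hn : k ≤ xs.length)
    (f : β → α → β) (dflt : α) (init : β) :
    (List.range k).foldl (fun acc j => f acc (xs.getD j dflt)) init
      = (xs.take k).foldl f init := by
  induction k generalizing init with
  | zero => simp
  | succ k ih =>
    have hk : k < xs.length := Nat.lt_of_succ_le hn
    rw [List.range_succ, List.foldl_append, ih hk.le init]
    rw [List.foldl_cons, List.foldl_nil, List.getD_eq_getElem xs dflt hk,
        List.take_add_one, List.getElem?_eq_getElem hk]
    simp only [Option.toList_some, List.foldl_append, List.foldl_cons, List.foldl_nil]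

theorem foldl_pyRange_take {α β : Type} (xs : List α) (n : Int) (hn : n ≤ xs.length)
    (f : β → α → β) (dflt : α) (init : β) :
    (PySem.List.pyRange 0 n 1).foldl (fun acc j => f acc (PySem.List.pyGetD xs j dflt)) init
      = (xs.take n.toNat).foldl f init := by
  rw [PySem.List.pyRange_one]
  simp only [sub_zero, List.foldl_map, zero_add, PySem.List.pyGetD_natCast]
  exact foldl_range_take xs n.toNat (by omega) f dflt init

theorem cnt_spec (ds : List Int) (c : List Int) (hmem : ∀ x ∈ ds, 0 ≤ x ∧ x < (c.length : Int)) :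
    ∀ j : Int, 0 ≤ j → j < (c.length : Int) →
      PySem.List.pyGetD (ds.foldl (fun c k => PySem.List.pySetD c k (PySem.List.pyGetD c k 0 + 1)) c) j 0
        = PySem.List.pyGetD c j 0 + (ds.count j : Int) := by
  induction ds generalizing c with
  | nil => intro j _ _; simp
  | cons k t ih =>
    intro j hj0 hjlen
    obtain ⟨hk0, hklen⟩ := hmem k List.mem_cons_self
    have hlen' : (PySem.List.pySetD c k (PySem.List.pyGetD c k 0 + 1)).length = c.length :=
      PySem.List.length_pySetD _ _ _
    rw [List.foldl_cons,
        ih _ (fun x hx => by rw [hlen']; exact hmem x (List.mem_cons_of_mem _ hx)) j hj0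
          (by rw [hlen']; exact hjlen)]
    have hkc : k = ((k.toNat : Nat) : Int) := by omega
    have hjc : j = ((j.toNat : Nat) : Int) := by omega
    have hset : PySem.List.pyGetD (PySem.List.pySetD c k (PySem.List.pyGetD c k 0 + 1)) j 0
        = if j.toNat = k.toNat then PySem.List.pyGetD c k 0 + 1 else PySem.List.pyGetD c j 0 := by
      rw [hkc, hjc]
      exact PySem.List.pyGetD_pySetD_natCast c k.toNat j.toNat _ 0 (by omega)
    rw [hset, List.count_cons]
    by_cases h : j = k
    · subst h
      simp only [beq_self_eq_true, if_pos]
      push_cast; ring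
    · have hne : ¬ (j.toNat = k.toNat) := by omega
      rw [if_neg hne]
      have hbeq : (k == j) = false := by simpa using fun hh => h hh.symm
      rw [hbeq]
      simp

theorem foldl_mul_mod {α : Type} (p : Int) (hp : 0 < p) (l : List α) (f : α → Int) :
    ∀ r : Int, l.foldl (fun res x => PySem.Int.mod (res * f x) p) (r % p) = (r * (l.map f).prod) % p := by
  induction l with
  | nil => intro r; simp
  | cons x t ih =>
    intro r
    rw [List.foldl_cons, PySem.Int.mod_eq_emod_of_pos hp]
    rw [show (r % p * f x) % p = (r * f x) % p by
      rw [Int.mul_emod, Int.emod_emod_of_dvd _ dvd_rfl, ← Int.mul_emod]]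
    rw [ih (r * f x)]
    simp [mul_assoc]

theorem prod_map_emod (p : Int) (l : List Int) (g : Int → Int) :
    (l.map (fun x => g x % p)).prod % p = (l.map g).prod % p := by
  induction l with
  | nil => rfl
  | cons x t ih =>
    simp only [List.map_cons, List.prod_cons]
    rw [Int.mul_emod, Int.emod_emod_of_dvd _ dvd_rfl, ih, ← Int.mul_emod]

theorem prod_map_eq_prod_pow_count (t : List Int) (g : Int → Int) (M : Nat)
    (h : ∀ d ∈ t, 0 < d ∧ d ≤ (M : Int)) :
    (t.map g).prod = ∏ i ∈ Finset.range M, g ((i : Int) + 1) ^ t.count ((i : Int) + 1) := by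
  induction t with
  | nil => simp
  | cons d t ih =>
    obtain ⟨hd0, hdM⟩ := h d List.mem_cons_self
    have ih' := ih (fun x hx => h x (List.mem_cons_of_mem _ hx))
    simp only [List.map_cons, List.prod_cons, List.count_cons]
    rw [ih']
    have hsplit : ∀ i ∈ Finset.range M,
        g ((i : Int) + 1) ^ (t.count ((i : Int) + 1) + if d == ((i : Int) + 1) then 1 else 0)
          = (g ((i : Int) + 1) ^ t.count ((i : Int) + 1)) * (if i = (d - 1).toNat then g d else 1) := by
      intro i hi
      by_cases hc : d = ((i : Int) + 1)
      · rw [if_pos (by exact beq_iff_eq.mpr hc), if_pos (by omega), pow_succ, ← hc]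
      · rw [if_neg (by simpa using hc), if_neg (by omega), add_zero, mul_one]
    rw [Finset.prod_congr rfl hsplit, Finset.prod_mul_distrib,
        Finset.prod_ite_eq' (Finset.range M) ((d - 1).toNat) (fun _ => g d)]
    rw [if_pos (Finset.mem_range.mpr (by omega))]
    ring

-- The two ports agree under Pre_solve.
theorem main (n : Int) (d_list : List Int)
    (hne : d_list ≠ []) (hlen : n ≤ PySem.List.len d_list) (hnn : ∀ d ∈ d_list, 0 ≤ d) :
    solve n d_list = solve_alt n d_list := by
  have hlen' : n ≤ (d_list.length : Int) := by simpa [PySem.List.len_eq] using hlen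
  -- the max
  obtain ⟨m, hm⟩ : ∃ m, PySem.List.max? d_list (fun x => x) = some m := by
    cases hmx : PySem.List.max? d_list (fun x => x) with
    | none => exact absurd ((PySem.List.max?_eq_none_iff _ _).mp hmx) hne
    | some m => exact ⟨m, rfl⟩
  have hm0 : 0 ≤ m := hnn m (PySem.List.max?_mem hm)
  have hmax : ∀ y ∈ d_list, y ≤ m := PySem.List.max?_isMax hm
  set ds := d_list.take n.toNat with hds
  have hds_sub : ∀ x ∈ ds, x ∈ d_list := fun x hx => List.mem_of_mem_take hx
  have hp : (0 : Int) < LARGE := by norm_num [LARGE]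
  -- A's count array
  have hcntA : (PySem.List.pyRange 0 n 1).foldl
      (fun c i => PySem.List.pySetD c (PySem.List.pyGetD d_list i 0)
        (PySem.List.pyGetD c (PySem.List.pyGetD d_list i 0) 0 + 1)) (List.replicate (m + 1).toNat (0:Int))
      = ds.foldl (fun c d => PySem.List.pySetD c d (PySem.List.pyGetD c d 0 + 1))
          (List.replicate (m + 1).toNat (0:Int)) := by
    exact foldl_pyRange_take d_list n hlen'
      (fun c d => PySem.List.pySetD c d (PySem.List.pyGetD c d 0 + 1)) 0 _
  set cntA : List Int := ds.foldl (fun c d => PySem.List.pySetD c d (PySem.List.pyGetD c d 0 + 1))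
      (List.replicate (m + 1).toNat (0:Int)) with hcA
  have hrep_len : ((List.replicate (m + 1).toNat (0:Int)).length : Int) = m + 1 := by
    simp [List.length_replicate]; omega
  have hmemc : ∀ x ∈ ds, 0 ≤ x ∧ x < ((List.replicate (m + 1).toNat (0:Int)).length : Int) := by
    intro x hx
    refine ⟨hnn x (hds_sub x hx), ?_⟩
    rw [hrep_len]
    have := hmax x (hds_sub x hx); omega
  have hA : ∀ j : Int, 0 ≤ j → j ≤ m → PySem.List.pyGetD cntA j 0 = (ds.count j : Int) := by
    intro j hj0 hjm
    rw [hcA, cnt_spec ds _ hmemc j hj0 (by rw [hrep_len]; omega)]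
    have : PySem.List.pyGetD (List.replicate (m + 1).toNat (0:Int)) j 0 = 0 := by
      rw [PySem.List.pyGetD_eq_getElem _ _ hj0 (by rw [hrep_len]; omega)]
      simp
    rw [this, zero_add]
  -- B's counter
  have hcntB : (PySem.List.pyRange 0 n 1).foldl
      (fun c i => PySem.Dict.insert c (PySem.List.pyGetD d_list i 0)
        (PySem.Dict.getD c (PySem.List.pyGetD d_list i 0) 0 + 1)) PySem.Dict.empty
      = PySem.Dict.counter ds := by
    rw [foldl_pyRange_take d_list n hlen'
      (fun (c : PySem.Dict Int Int) k => c.insert k (c.getD k 0 + 1)) 0 _]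
    exact PySem.Dict.foldl_insert_getD_add_one_eq_counter ds
  have hB : ∀ j : Int, (PySem.Dict.counter ds).getD j 0 = (ds.count j : Int) :=
    fun j => PySem.Dict.getD_counter ds j
  -- unfold both sides
  show solve n d_list = solve_alt n d_list
  rw [solve, solve_alt]
  simp only [hm, Option.getD_some, hcntA, hcntB]
  rw [hA 0 le_rfl hm0, hB 0]
  by_cases hc : ((ds.count 0 : Int) ≠ 1 ∨ PySem.List.pyGetD d_list 0 0 ≠ 0)
  · rw [if_pos hc, if_pos hc]
  · rw [if_neg hc, if_neg hc]
    -- A's product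
    have hAprod : (PySem.List.pyRange 0 m 1).foldl
        (fun res i => PySem.Int.mod
          (res * PySem.Int.powMod (PySem.List.pyGetD cntA i 0)
            (PySem.List.pyGetD cntA (i + 1) 0).toNat LARGE) LARGE) 1
        = (((PySem.List.pyRange 0 m 1).map
            (fun i => ((ds.count i : Int) ^ (ds.count (i+1)) % LARGE))).prod) % LARGE := by
      have hcg := PySem.List.foldl_congr_mem
        (l := PySem.List.pyRange 0 m 1) (init := (1:Int))
        (f := fun res i => PySem.Int.mod
          (res * PySem.Int.powMod (PySem.List.pyGetD cntA i 0)
            (PySem.List.pyGetD cntA (i + 1) 0).toNat LARGE) LARGE)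
        (g := fun res i => PySem.Int.mod (res * ((ds.count i : Int) ^ (ds.count (i+1)) % LARGE)) LARGE)
        (by
          intro acc i hi
          rw [PySem.List.mem_pyRange_one] at hi
          simp only
          rw [hA i hi.1 (by omega), hA (i+1) (by omega) (by omega)]
          simp only [PySem.Int.powMod, PySem.Int.mod_eq_emod_of_pos hp, Int.toNat_natCast])
      rw [hcg]
      rw [show (1 : Int) = 1 % LARGE by norm_num [LARGE]]
      rw [foldl_mul_mod LARGE hp _ _ 1, one_mul]
    rw [hAprod, prod_map_emod]
    -- B's product
    have hBprod : (PySem.List.pyRange 0 n 1).foldl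
        (fun res i =>
          if 0 < PySem.List.pyGetD d_list i 0 then
            PySem.Int.mod (res * (PySem.Dict.counter ds).getD (PySem.List.pyGetD d_list i 0 - 1) 0) LARGE
          else res) 1
        = ((ds.filter (fun d => decide (0 < d))).map
            (fun d => ((ds.count (d-1) : Int)))).prod % LARGE := by
      rw [foldl_pyRange_take d_list n hlen'
        (fun res d => if 0 < d then PySem.Int.mod (res * (PySem.Dict.counter ds).getD (d - 1) 0) LARGE else res) 0 1]
      have hcg := PySem.List.foldl_congr_mem
        (l := ds) (init := (1:Int))
        (f := fun res d => if 0 < d then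
            PySem.Int.mod (res * (PySem.Dict.counter ds).getD (d - 1) 0) LARGE else res)
        (g := fun res d => if 0 < d then PySem.Int.mod (res * (ds.count (d-1) : Int)) LARGE else res)
        (by intro acc d _; by_cases h0 : 0 < d <;> simp only [h0, hB (d-1)])
      rw [hcg]
      rw [PySem.List.foldl_ite_eq_foldl_filter (fun d => 0 < d)
        (fun res d => PySem.Int.mod (res * (ds.count (d-1) : Int)) LARGE) ds 1]
      rw [show (1 : Int) = 1 % LARGE by norm_num [LARGE]]
      rw [foldl_mul_mod LARGE hp _ _ 1, one_mul]
    rw [hBprod]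
    -- both are products
    congr 1
    rw [prod_map_eq_prod_pow_count (ds.filter (fun d => decide (0 < d)))
      (fun d => (ds.count (d-1) : Int)) m.toNat
      (by
        intro d hd
        have hmem := List.mem_of_mem_filter hd
        have hpos : 0 < d := by simpa using (List.of_mem_filter hd)
        exact ⟨hpos, by have := hmax d (hds_sub d hmem); omega⟩)]
    rw [PySem.List.pyRange_one]
    simp only [sub_zero, List.map_map]
    rw [show (List.map ((fun i => ((ds.count i : Int) ^ (ds.count (i+1)))) ∘ fun k : Nat => (0:Int) + ↑k)
          (List.range m.toNat)).prod
        = ∏ i ∈ Finset.range m.toNat, ((ds.count ((0:Int) + (i:Int)) : Int) ^ (ds.count ((0:Int) + (i:Int) + 1)))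
      from rfl]
    apply Finset.prod_congr rfl
    intro i _
    have hfilter : (ds.filter (fun d => decide (0 < d))).count ((i:Int)+1) = ds.count ((i:Int)+1) :=
      List.count_filter (by simp)
    rw [hfilter]
    norm_num


-- ===== VERDICT (by name: the statement is the Claim_ definition above) =====
theorem solve_spec : Claim_equal_solve := by
  intro n d_list _ hpre
  unfold Spec_solve
  exact main n d_list hpre.1 hpre.2.1 hpre.2.2
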